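-- pv_equiv track=rewrite | github.com/AB-IN-lsy/VSCode | ACM/NiuKe/m.py | perfectString
-- ===== SOURCE A (Python) =====
-- def perfectString(s, k):
--     # Write your code here.
--     lst=[]
--     ans=0
--     cnt=0
--     for i in s:
--         if i == '0':
--             ans+=1
--         if i != '0' and ans!=0:
--             lst.append(ans)
--             ans=0
--     if ans!=0:
--         lst.append(ans)
--     for i in lst:
--         if i%k!=0:
--             cnt+=((i//k)+1)
--         else:
--             cnt+=(i//k)
--     return cnt
-- ===== SOURCE B (Python) =====
-- def perfectString(s, k):
--     # Extract maximal zero-runs with a whitespace split, then sum each run's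
--     # modular ceiling contribution in one comprehension.
--     runs = "".join(c if c == '0' else ' ' for c in s).split()
--     return sum(len(r) // k + (1 if len(r) % k != 0 else 0) for r in runs)
-- ===== Notes on version B (the rewrite author's own statement) =====
-- stated objective: idiomatic
-- what changed: Replaces A's per-character run state machine plus a second loop over the collected run list with a whitespace split that extracts maximal zero-runs at once and a single summed comprehension over their lengths (keeping A's exact i//k + (i%k!=0) modular ceiling, valid for negative k).
import Mathlib
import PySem

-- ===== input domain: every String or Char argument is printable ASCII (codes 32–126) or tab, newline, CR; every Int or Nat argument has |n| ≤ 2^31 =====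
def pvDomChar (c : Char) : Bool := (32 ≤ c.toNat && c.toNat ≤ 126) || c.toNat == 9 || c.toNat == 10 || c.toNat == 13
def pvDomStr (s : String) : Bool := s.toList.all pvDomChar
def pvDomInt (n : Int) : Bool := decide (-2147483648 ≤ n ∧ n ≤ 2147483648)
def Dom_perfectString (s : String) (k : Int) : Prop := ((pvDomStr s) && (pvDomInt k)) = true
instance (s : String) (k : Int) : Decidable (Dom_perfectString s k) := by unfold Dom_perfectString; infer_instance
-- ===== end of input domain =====

-- B replaces A's two imperative loops (per-character run state machine + list pass)
-- by a whitespace split into maximal zero-runs and a single summed comprehension (idiomatic).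


-- ===== PORT A =====
-- one loop step of A: update the current zero-run length, flush it into lst when the run ends
def pvStepA (st : List Int × Int) (c : Char) : List Int × Int :=
  let ans := if c = '0' then st.2 + 1 else st.2
  if c ≠ '0' ∧ ans ≠ 0 then (st.1 ++ [ans], 0) else (st.1, ans)

def perfectString (s : String) (k : Int) : Int :=
  let st := s.toList.foldl pvStepA ([], 0)
  let lst := if st.2 ≠ 0 then st.1 ++ [st.2] else st.1
  lst.foldl (fun cnt i =>
    if PySem.Int.mod i k ≠ 0 then cnt + (PySem.Int.floordiv i k + 1)
    else cnt + PySem.Int.floordiv i k) 0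

-- ===== PORT B =====
-- contribution of one zero-run r: len(r)//k + (1 if len(r)%k != 0 else 0)
def pvContrib (k : Int) (r : List Char) : Int :=
  PySem.Int.floordiv (r.length : Int) k +
    (if PySem.Int.mod (r.length : Int) k ≠ 0 then 1 else 0)

def perfectString_alt (s : String) (k : Int) : Int :=
  ((PySem.Chars.split₀ (s.toList.map (fun c => if c = '0' then c else ' '))).map
    (pvContrib k)).sum

-- ===== PRECONDITION & SPEC =====
-- Pre_ excludes exactly the inputs where Python A raises ZeroDivisionError: k = 0 with a '0' in s.
def Pre_perfectString (s : String) (k : Int) : Prop := k ≠ 0 ∨ '0' ∉ s.toList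
instance (s : String) (k : Int) : Decidable (Pre_perfectString s k) := by
  unfold Pre_perfectString; infer_instance

def pvWitness_perfectString : String × Int := ("a0010x000", 2)

def Spec_perfectString (s : String) (k : Int) (out : Int) : Prop := out = perfectString_alt s k
instance (s : String) (k : Int) (out : Int) : Decidable (Spec_perfectString s k out) := by
  unfold Spec_perfectString; infer_instance

-- ===== CLAIM (what is proved, stated in full; the proofs are below) =====
def Claim_equal_perfectString : Prop :=
  ∀ (s : String) (k : Int), Dom_perfectString s k → Pre_perfectString s k →
    Spec_perfectString s k (perfectString s k)

-- ===== LEMMAS AND PROOFS =====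

-- A's final run list equals the lengths of B's whitespace-split runs (state-machine invariant)
theorem pvRuns_eq (cs : List Char) (lst : List Int) (ans : Int) (cur : List Char)
    (acc : List (List Char))
    (hlen : (cur.length : Int) = ans) (hacc : acc.reverse.map (fun r => (r.length : Int)) = lst) :
    ((PySem.Chars.split₀.go (cs.map (fun c => if c = '0' then c else ' ')) cur acc).map
      (fun r => (r.length : Int)))
    = (let st := cs.foldl pvStepA (lst, ans)
       if st.2 ≠ 0 then st.1 ++ [st.2] else st.1) := by
  induction cs generalizing lst ans cur acc with
  | nil =>
    simp only [List.map_nil, List.foldl_nil, PySem.Chars.split₀.go]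
    by_cases h : cur = []
    · subst h
      have : ans = 0 := by simpa using hlen.symm
      simp [this, hacc]
    · have hne : ans ≠ 0 := by
        intro h0; apply h; rw [h0] at hlen; simpa using hlen
      simp [h, hne, List.isEmpty_iff, hacc.symm, hlen]
  | cons c rest ih =>
    by_cases hc : c = '0'
    · subst hc
      simp only [List.map_cons, PySem.Chars.split₀.go, List.foldl_cons]
      have hstep : pvStepA (lst, ans) '0' = (lst, ans + 1) := by
        simp [pvStepA]
      rw [hstep]
      exact ih lst (ans + 1) ('0' :: cur) acc (by simp [← hlen]) hacc
    · have hsp : PySem.Chars.isspace ' ' = true := by decide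
      simp only [List.map_cons, if_neg hc, PySem.Chars.split₀.go, hsp, if_true, List.foldl_cons]
      by_cases h : cur = []
      · subst h
        have h0 : ans = 0 := by simpa using hlen.symm
        have hA : pvStepA (lst, ans) c = (lst, ans) := by
          simp [pvStepA, hc, h0]
        rw [hA]
        simp only [List.isEmpty_nil]
        exact ih lst ans [] acc (by simp [← h0]) hacc
      · have hne : ans ≠ 0 := by
          intro h0; apply h; rw [h0] at hlen; simpa using hlen
        have hA : pvStepA (lst, ans) c = (lst ++ [ans], 0) := by
          simp [pvStepA, hc, hne]
        rw [hA]
        have hie : cur.isEmpty = false := by simp [h]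
        simp only [hie, Bool.false_eq_true, if_false]
        exact ih (lst ++ [ans]) 0 [] (cur.reverse :: acc) (by simp)
          (by simp [hacc, hlen])

-- A's second loop is the sum of per-run contributions
theorem pvFold_sum (k : Int) (l : List Int) (c0 : Int) :
    l.foldl (fun cnt i =>
      if PySem.Int.mod i k ≠ 0 then cnt + (PySem.Int.floordiv i k + 1)
      else cnt + PySem.Int.floordiv i k) c0
    = c0 + (l.map (fun i => PySem.Int.floordiv i k +
        if PySem.Int.mod i k ≠ 0 then 1 else 0)).sum := by
  induction l generalizing c0 with
  | nil => simp
  | cons i t ih =>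
    simp only [List.foldl_cons, List.map_cons, List.sum_cons, ih]
    split_ifs <;> ring

-- ===== VERDICT (by name: the statement is the Claim_ definition above) =====
theorem perfectString_spec : Claim_equal_perfectString := by
  intro s k _ _
  unfold Spec_perfectString perfectString perfectString_alt
  rw [pvFold_sum, zero_add]
  have h := pvRuns_eq s.toList [] 0 [] [] (by simp) (by simp)
  have hgo : PySem.Chars.split₀ (s.toList.map (fun c => if c = '0' then c else ' '))
      = PySem.Chars.split₀.go (s.toList.map (fun c => if c = '0' then c else ' ')) [] [] := rfl
  rw [hgo, ← h, List.map_map]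
  have hfun : ((fun i => PySem.Int.floordiv i k +
      if PySem.Int.mod i k ≠ 0 then 1 else 0) ∘ fun r : List Char => (r.length : Int))
      = pvContrib k := rfl
  rw [hfun]
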